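-- pv_equiv track=rewrite | github.com/digitalculturologist/xquendart | app.py | parse_txt_file
-- ===== SOURCE A (Python) =====
-- def parse_txt_file(content):
--     """
--     Parses the poet's TXT file into word lists and poems.
--     """
--     lists = {}
--     poems = []
--
--     lines = content.strip().split("\n")
--     current_section = None
--     current_name = None
--     current_content = []
--
--     for line in lines:
--         stripped = line.strip()
--
--         if stripped.startswith("=== LISTA:") and stripped.endswith("==="):
--             if current_section == "lista" and current_name:
--                 lists[current_name] = current_content
--             elif current_section == "poema" and current_content:
--                 poems.append("\n".join(current_content))
--
--             current_section = "lista"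
--             current_name = stripped.replace("=== LISTA:", "").replace("===", "").strip()
--             current_content = []
--
--         elif stripped == "=== POEMA ===":
--             if current_section == "lista" and current_name:
--                 lists[current_name] = current_content
--             elif current_section == "poema" and current_content:
--                 poems.append("\n".join(current_content))
--
--             current_section = "poema"
--             current_name = None
--             current_content = []
--
--         elif stripped and current_section:
--             if current_section == "lista":
--                 if "|" in stripped:
--                     parts = stripped.split("|")
--                     word = parts[0].strip()
--                     translation = parts[1].strip() if len(parts) > 1 else ""
--                     current_content.append({"word": word, "translation": translation})
--                 else:
--                     current_content.append({"word": stripped, "translation": ""})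
--             elif current_section == "poema":
--                 current_content.append(stripped)
--
--     if current_section == "lista" and current_name:
--         lists[current_name] = current_content
--     elif current_section == "poema" and current_content:
--         poems.append("\n".join(current_content))
--
--     return lists, poems
-- ===== SOURCE B (Python) =====
-- def _parse_entry(s):
--     if "|" in s:
--         parts = s.split("|")
--         return {"word": parts[0].strip(),
--                 "translation": parts[1].strip() if len(parts) > 1 else ""}
--     return {"word": s, "translation": ""}
--
--
-- def parse_txt_file(content):
--     """
--     Parses the poet's TXT file into word lists and poems.
--     Two-pass: first collect section blocks, then emit outputs from them.
--     """
--     # pass 1: split into blocks of (kind, name, raw stripped lines)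
--     blocks = []
--     cur = None
--     for line in content.strip().split("\n"):
--         s = line.strip()
--         if s.startswith("=== LISTA:") and s.endswith("==="):
--             if cur is not None:
--                 blocks.append(cur)
--             name = s.replace("=== LISTA:", "").replace("===", "").strip()
--             cur = ("lista", name, [])
--         elif s == "=== POEMA ===":
--             if cur is not None:
--                 blocks.append(cur)
--             cur = ("poema", "", [])
--         elif s and cur is not None:
--             cur[2].append(s)
--     if cur is not None:
--         blocks.append(cur)
--
--     # pass 2: emit
--     lists = {}
--     poems = []
--     for kind, name, raw in blocks:
--         if kind == "lista":
--             if name: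
--                 lists[name] = [_parse_entry(s) for s in raw]
--         elif raw:
--             poems.append("\n".join(raw))
--     return lists, poems
-- ===== Notes on version B (the rewrite author's own statement) =====
-- stated objective: simpler
-- what changed: A interleaves parsing and emission in one loop whose header branches duplicate the flush logic three times; B first collects the file into a list of section blocks (kind, name, raw lines) and then emits lists/poems from the blocks in a second pass, keeping the same header detection, name extraction and pipe-separated entry parsing.
import Mathlib
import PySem

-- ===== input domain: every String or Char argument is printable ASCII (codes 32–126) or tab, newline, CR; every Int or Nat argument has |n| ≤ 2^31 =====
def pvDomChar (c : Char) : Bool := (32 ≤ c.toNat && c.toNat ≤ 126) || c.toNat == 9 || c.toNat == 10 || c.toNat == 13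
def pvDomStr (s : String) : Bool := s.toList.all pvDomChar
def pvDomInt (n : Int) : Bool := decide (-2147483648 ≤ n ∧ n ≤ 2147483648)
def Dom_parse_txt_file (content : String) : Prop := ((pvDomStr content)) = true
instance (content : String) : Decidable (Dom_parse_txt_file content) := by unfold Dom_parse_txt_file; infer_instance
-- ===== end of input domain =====

-- B replaces A's single stateful flush-as-you-go loop by two passes (collect section
-- blocks, then emit); objective: simpler decomposition, same cost.

-- ===== PORT A =====

-- Python truthiness of current_section / current_name (None or a string)
def pvTruthyOpt (o : Option String) : Bool :=
  match o with
  | none => false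
  | some s => s != ""

-- the entry dict A appends for a lista line ({"word": …, "translation": …})
-- (split? returns none only for sep = ""; here sep is "|", so .getD [] never fires)
def pvEntryA (s : String) : List (String × String) :=
  if PySem.Str.isIn "|" s then
    let parts := (PySem.Str.split? s "|").getD []
    [("word", PySem.Str.strip (PySem.List.pyGetD parts 0 "")),
     ("translation", if parts.length > 1 then PySem.Str.strip (PySem.List.pyGetD parts 1 "") else "")]
  else
    [("word", s), ("translation", "")]

-- A's loop state: lists, poems, current_section, current_name, current_content
-- (current_content is a heterogeneous Python list: dicts in a lista, strings in a poema — Sum)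
structure PvStA where
  lists : PySem.Dict String (List (List (String × String)))
  poems : List String
  sec : Option String
  name : Option String
  cc : List (Sum (List (String × String)) String)

-- the flush code Python repeats verbatim three times (two header branches + after the loop)
def pvFlushA (st : PvStA) :
    PySem.Dict String (List (List (String × String))) × List String :=
  if (st.sec == some "lista") && pvTruthyOpt st.name then
    (st.lists.insert (st.name.getD "") (st.cc.map (Sum.elim id (fun _ => []))), st.poems)
  else if (st.sec == some "poema") && !st.cc.isEmpty then
    (st.lists, st.poems ++ [PySem.Str.join "\n" (st.cc.map (Sum.elim (fun _ => "") id))])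
  else
    (st.lists, st.poems)

def pvStepA (st : PvStA) (line : String) : PvStA :=
  let stripped := PySem.Str.strip line
  if PySem.Str.startswith stripped "=== LISTA:" && PySem.Str.endswith stripped "===" then
    let r := pvFlushA st
    ⟨r.1, r.2, some "lista",
     some (PySem.Str.strip (PySem.Str.replace (PySem.Str.replace stripped "=== LISTA:" "") "===" "")),
     []⟩
  else if stripped == "=== POEMA ===" then
    let r := pvFlushA st
    ⟨r.1, r.2, some "poema", none, []⟩
  else if (stripped != "") && pvTruthyOpt st.sec then
    if st.sec == some "lista" then
      { st with cc := st.cc ++ [Sum.inl (pvEntryA stripped)] }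
    else if st.sec == some "poema" then
      { st with cc := st.cc ++ [Sum.inr stripped] }
    else st
  else st

def parse_txt_file (content : String) :
    (List (String × List (List (String × String)))) × List String :=
  let lines := (PySem.Str.split? (PySem.Str.strip content) "\n").getD []
  let st := lines.foldl pvStepA ⟨PySem.Dict.empty, [], none, none, []⟩
  let r := pvFlushA st
  (r.1.items, r.2)

-- ===== PORT B =====

-- B's _parse_entry
def pvEntryB (s : String) : List (String × String) :=
  if PySem.Str.isIn "|" s then
    let parts := (PySem.Str.split? s "|").getD []
    [("word", PySem.Str.strip (PySem.List.pyGetD parts 0 "")),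
     ("translation", if parts.length > 1 then PySem.Str.strip (PySem.List.pyGetD parts 1 "") else "")]
  else
    [("word", s), ("translation", "")]

-- pass 1 step; state = (blocks, cur), a block = (kind, name, raw stripped lines)
def pvStep1 (st : List (String × String × List String) × Option (String × String × List String))
    (line : String) : List (String × String × List String) × Option (String × String × List String) :=
  let s := PySem.Str.strip line
  if PySem.Str.startswith s "=== LISTA:" && PySem.Str.endswith s "===" then
    (st.1 ++ st.2.toList,
     some ("lista", PySem.Str.strip (PySem.Str.replace (PySem.Str.replace s "=== LISTA:" "") "===" ""), []))
  else if s == "=== POEMA ===" then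
    (st.1 ++ st.2.toList, some ("poema", "", []))
  else if (s != "") && st.2.isSome then
    (st.1, st.2.map (fun b => (b.1, b.2.1, b.2.2 ++ [s])))
  else st

-- pass 2 step: emit one block into (lists, poems)
def pvStep2 (acc : PySem.Dict String (List (List (String × String))) × List String)
    (b : String × String × List String) :
    PySem.Dict String (List (List (String × String))) × List String :=
  if b.1 == "lista" then
    if b.2.1 != "" then (acc.1.insert b.2.1 (b.2.2.map pvEntryB), acc.2) else acc
  else if !b.2.2.isEmpty then (acc.1, acc.2 ++ [PySem.Str.join "\n" b.2.2])
  else acc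

def parse_txt_file_alt (content : String) :
    (List (String × List (List (String × String)))) × List String :=
  let q := ((PySem.Str.split? (PySem.Str.strip content) "\n").getD []).foldl pvStep1 ([], none)
  let blocks := q.1 ++ q.2.toList
  let res := blocks.foldl pvStep2 (PySem.Dict.empty, [])
  (res.1.items, res.2)

-- ===== PRECONDITION & SPEC =====
def Spec_parse_txt_file (content : String) (out : (List (String × List (List (String × String)))) × List String) : Prop := out = parse_txt_file_alt content
instance (content : String) (out : (List (String × List (List (String × String)))) × List String) : Decidable (Spec_parse_txt_file content out) := by unfold Spec_parse_txt_file; infer_instance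

-- ===== CLAIM (what is proved, stated in full; the proofs are below) =====
def Claim_equal_parse_txt_file : Prop := ∀ (content : String), Dom_parse_txt_file content → Spec_parse_txt_file content (parse_txt_file content)

-- ===== LEMMAS AND PROOFS =====

lemma pvEntryA_eq_pvEntryB : pvEntryA = pvEntryB := rfl

-- A's open-section state corresponds to B's current block
def pvRel (sec name : Option String) (cc : List (Sum (List (String × String)) String))
    (cur : Option (String × String × List String)) : Prop :=
  match cur with
  | none => sec = none ∧ name = none ∧ cc = []
  | some (k, n, raw) =>
      (k = "lista" ∧ sec = some "lista" ∧ name = some n ∧ cc = raw.map (fun s => Sum.inl (pvEntryA s)))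
    ∨ (k = "poema" ∧ sec = some "poema" ∧ name = none ∧ cc = raw.map Sum.inr)

-- flushing A's open section = emitting B's current block
lemma pvFlush_eq (l : PySem.Dict String (List (List (String × String)))) (p : List String)
    (sec name : Option String) (cc : List (Sum (List (String × String)) String))
    (cur : Option (String × String × List String)) (h : pvRel sec name cc cur) :
    pvFlushA ⟨l, p, sec, name, cc⟩ = cur.toList.foldl pvStep2 (l, p) := by
  match cur with
  | none =>
    obtain ⟨h1, h2, h3⟩ := h
    subst h1; subst h2; subst h3
    simp [pvFlushA, pvTruthyOpt]
  | some (k, n, raw) =>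
    rcases h with ⟨hk, h1, h2, h3⟩ | ⟨hk, h1, h2, h3⟩
    · subst hk; subst h1; subst h2; subst h3
      by_cases hn : n = ""
      · subst hn; simp [pvFlushA, pvTruthyOpt, pvStep2]
      · simp [pvFlushA, pvTruthyOpt, pvStep2, hn, List.map_map, Function.comp_def,
              pvEntryA_eq_pvEntryB]
    · subst hk; subst h1; subst h2; subst h3
      by_cases hr : raw = []
      · subst hr; simp [pvFlushA, pvTruthyOpt, pvStep2]
      · simp [pvFlushA, pvTruthyOpt, pvStep2, hr, List.map_map, Function.comp_def]

-- one pass-1 step only appends to the closed-blocks accumulator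
lemma pvStep1_single (bs : List (String × String × List String))
    (cur : Option (String × String × List String)) (line : String) :
    pvStep1 (bs, cur) line = (bs ++ (pvStep1 ([], cur) line).1, (pvStep1 ([], cur) line).2) := by
  simp only [pvStep1]
  split_ifs <;> simp

-- so the whole pass-1 fold does too
lemma pvStep1_acc (ls : List String) :
    ∀ (bs : List (String × String × List String)) (cur : Option (String × String × List String)),
    ls.foldl pvStep1 (bs, cur) =
      (bs ++ (ls.foldl pvStep1 ([], cur)).1, (ls.foldl pvStep1 ([], cur)).2) := by
  induction ls with
  | nil => intro bs cur; simp
  | cons line ls ih =>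
    intro bs cur
    simp only [List.foldl_cons]
    cases hx : pvStep1 ([], cur) line with
    | mk x1 x2 =>
      rw [pvStep1_single bs cur line, hx]
      rw [ih (bs ++ x1) x2, ih x1 x2]
      simp

-- main invariant: A's loop + final flush = B's pass 1 + pass 2
lemma pvMain (ls : List String) :
    ∀ (l : PySem.Dict String (List (List (String × String)))) (p : List String)
      (sec name : Option String) (cc : List (Sum (List (String × String)) String))
      (cur : Option (String × String × List String)), pvRel sec name cc cur →
    pvFlushA (ls.foldl pvStepA ⟨l, p, sec, name, cc⟩) =
      ((ls.foldl pvStep1 ([], cur)).1 ++ (ls.foldl pvStep1 ([], cur)).2.toList).foldl pvStep2 (l, p) := by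
  induction ls with
  | nil =>
    intro l p sec name cc cur h
    simp only [List.foldl_nil, List.nil_append]
    exact pvFlush_eq l p sec name cc cur h
  | cons line ls ih =>
    intro l p sec name cc cur h
    simp only [List.foldl_cons]
    by_cases h1 : (PySem.Str.startswith (PySem.Str.strip line) "=== LISTA:"
                    && PySem.Str.endswith (PySem.Str.strip line) "===") = true
    · -- LISTA header: both sides close the open block and start a lista block
      have hA : pvStepA ⟨l, p, sec, name, cc⟩ line =
          ⟨(pvFlushA ⟨l, p, sec, name, cc⟩).1, (pvFlushA ⟨l, p, sec, name, cc⟩).2, some "lista",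
           some (PySem.Str.strip (PySem.Str.replace
             (PySem.Str.replace (PySem.Str.strip line) "=== LISTA:" "") "===" "")), []⟩ := by
        simp only [pvStepA]; rw [if_pos h1]
      have hB : pvStep1 ([], cur) line =
          (cur.toList, some ("lista", PySem.Str.strip (PySem.Str.replace
             (PySem.Str.replace (PySem.Str.strip line) "=== LISTA:" "") "===" ""), [])) := by
        simp only [pvStep1]; rw [if_pos h1]; simp
      rw [hA, hB]
      rw [pvStep1_acc ls cur.toList _]
      rw [ih (pvFlushA ⟨l, p, sec, name, cc⟩).1 (pvFlushA ⟨l, p, sec, name, cc⟩).2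
            (some "lista") (some _) [] (some ("lista", _, [])) (Or.inl ⟨rfl, rfl, rfl, by simp⟩)]
      rw [pvFlush_eq l p sec name cc cur h]
      simp [List.foldl_append, List.append_assoc]
    · by_cases h2 : (PySem.Str.strip line == "=== POEMA ===") = true
      · -- POEMA header
        have hA : pvStepA ⟨l, p, sec, name, cc⟩ line =
            ⟨(pvFlushA ⟨l, p, sec, name, cc⟩).1, (pvFlushA ⟨l, p, sec, name, cc⟩).2,
             some "poema", none, []⟩ := by
          simp only [pvStepA]; rw [if_neg h1, if_pos h2]
        have hB : pvStep1 ([], cur) line = (cur.toList, some ("poema", "", [])) := by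
          simp only [pvStep1]; rw [if_neg h1, if_pos h2]; simp
        rw [hA, hB]
        rw [pvStep1_acc ls cur.toList _]
        rw [ih (pvFlushA ⟨l, p, sec, name, cc⟩).1 (pvFlushA ⟨l, p, sec, name, cc⟩).2
              (some "poema") none [] (some ("poema", "", [])) (Or.inr ⟨rfl, rfl, rfl, by simp⟩)]
        rw [pvFlush_eq l p sec name cc cur h]
        simp [List.foldl_append, List.append_assoc]
      · -- not a header
        by_cases h3 : PySem.Str.strip line = ""
        · -- blank line: both steps are the identity
          have hA : pvStepA ⟨l, p, sec, name, cc⟩ line = ⟨l, p, sec, name, cc⟩ := by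
            simp only [pvStepA]; rw [if_neg h1, if_neg h2, if_neg (by simp [h3])]
          have hB : pvStep1 ([], cur) line = ([], cur) := by
            simp only [pvStep1]; rw [if_neg h1, if_neg h2, if_neg (by simp [h3])]
          rw [hA, hB]
          exact ih l p sec name cc cur h
        · -- content line
          match cur with
          | none =>
            obtain ⟨e1, e2, e3⟩ := h
            subst e1; subst e2; subst e3
            have hA : pvStepA ⟨l, p, none, none, []⟩ line = ⟨l, p, none, none, []⟩ := by
              simp only [pvStepA]; rw [if_neg h1, if_neg h2, if_neg (by simp [pvTruthyOpt])]
            have hB : pvStep1 ([], none) line = ([], none) := by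
              simp only [pvStep1]; rw [if_neg h1, if_neg h2, if_neg (by simp)]
            rw [hA, hB]
            exact ih l p none none [] none ⟨rfl, rfl, rfl⟩
          | some (k, n, raw) =>
            rcases h with ⟨hk, e1, e2, e3⟩ | ⟨hk, e1, e2, e3⟩
            · subst hk; subst e1; subst e2; subst e3
              have hA : pvStepA ⟨l, p, some "lista", some n, raw.map (fun s => Sum.inl (pvEntryA s))⟩ line =
                  ⟨l, p, some "lista", some n,
                   (raw ++ [PySem.Str.strip line]).map (fun s => Sum.inl (pvEntryA s))⟩ := by
                simp only [pvStepA]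
                rw [if_neg h1, if_neg h2, if_pos (by simp [pvTruthyOpt, h3]), if_pos (by decide)]
                simp
              have hB : pvStep1 ([], some ("lista", n, raw)) line =
                  ([], some ("lista", n, raw ++ [PySem.Str.strip line])) := by
                simp only [pvStep1]
                rw [if_neg h1, if_neg h2, if_pos (by simp [h3])]
                simp
              rw [hA, hB]
              exact ih l p (some "lista") (some n) _ (some ("lista", n, raw ++ [PySem.Str.strip line]))
                (Or.inl ⟨rfl, rfl, rfl, rfl⟩)
            · subst hk; subst e1; subst e2; subst e3
              have hA : pvStepA ⟨l, p, some "poema", none, raw.map Sum.inr⟩ line =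
                  ⟨l, p, some "poema", none, (raw ++ [PySem.Str.strip line]).map Sum.inr⟩ := by
                simp only [pvStepA]
                rw [if_neg h1, if_neg h2, if_pos (by simp [pvTruthyOpt, h3]), if_neg (by decide),
                    if_pos (by decide)]
                simp
              have hB : pvStep1 ([], some ("poema", n, raw)) line =
                  ([], some ("poema", n, raw ++ [PySem.Str.strip line])) := by
                simp only [pvStep1]
                rw [if_neg h1, if_neg h2, if_pos (by simp [h3])]
                simp
              rw [hA, hB]
              exact ih l p (some "poema") none _ (some ("poema", n, raw ++ [PySem.Str.strip line]))
                (Or.inr ⟨rfl, rfl, rfl, rfl⟩)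

-- ===== VERDICT (by name: the statement is the Claim_ definition above) =====
theorem parse_txt_file_spec : Claim_equal_parse_txt_file := by
  intro content _
  unfold Spec_parse_txt_file parse_txt_file parse_txt_file_alt
  have h := pvMain ((PySem.Str.split? (PySem.Str.strip content) "\n").getD [])
    PySem.Dict.empty [] none none [] none ⟨rfl, rfl, rfl⟩
  simp only [h]
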